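-- pv_equiv track=rewrite | github.com/francerferreira/checklist-frota | desktop/services/export_service.py | _detect_category_column
-- ===== SOURCE A (Python) =====
-- def _detect_category_column(columns):
--     preferred = ["item_nome", "item", "frota", "modelo"]
--     for key in preferred:
--         for label, column_key in columns:
--             if column_key == key:
--                 return column_key, label
--     if columns:
--         return columns[0][1], columns[0][0]
--     return None, None
-- ===== SOURCE B (Python) =====
-- def _detect_category_column(columns):
--     preferred = ["item_nome", "item", "frota", "modelo"]
--     best = None
--     best_rank = len(preferred)
--     for label, column_key in columns:
--         rank = preferred.index(column_key) if column_key in preferred else len(preferred)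
--         if rank < best_rank:
--             best = (column_key, label)
--             best_rank = rank
--     if best is not None:
--         return best
--     if columns:
--         return columns[0][1], columns[0][0]
--     return None, None
-- ===== Notes on version B (the rewrite author's own statement) =====
-- stated objective: alternative
-- what changed: Replaces the preferred-keys-outer nested loops (up to 4 scans of columns) by a single pass over columns that tracks the best column by its rank in the preferred list, updating only on strictly smaller rank to keep first-occurrence tie-breaking.
import Mathlib
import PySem

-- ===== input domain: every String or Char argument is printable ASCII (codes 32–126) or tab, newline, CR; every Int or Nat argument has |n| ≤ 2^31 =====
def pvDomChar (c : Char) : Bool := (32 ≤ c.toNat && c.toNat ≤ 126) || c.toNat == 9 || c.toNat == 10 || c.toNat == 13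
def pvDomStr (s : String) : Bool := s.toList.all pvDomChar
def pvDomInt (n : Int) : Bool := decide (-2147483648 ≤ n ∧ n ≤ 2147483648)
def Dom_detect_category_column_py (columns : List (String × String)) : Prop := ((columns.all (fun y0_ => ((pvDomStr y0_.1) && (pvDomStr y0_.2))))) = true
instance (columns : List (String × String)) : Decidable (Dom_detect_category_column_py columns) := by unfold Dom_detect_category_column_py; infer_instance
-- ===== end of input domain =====

-- B replaces A's preferred-outer nested loops by one pass over columns tracking the best rank; objective: alternative decomposition, same results.

-- ===== PORT A =====
-- inner loop: 'for label, column_key in columns: if column_key == key: return column_key, label'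
def pvFindA (key : String) : List (String × String) → Option (String × String)
  | [] => none
  | (label, column_key) :: rest =>
      if column_key = key then some (column_key, label) else pvFindA key rest

-- outer loop: 'for key in preferred: …' (early return on the first key that matches)
def pvOuterA (ks : List String) (columns : List (String × String)) : Option (String × String) :=
  match ks with
  | [] => none
  | k :: ks' =>
      match pvFindA k columns with
      | some r => some r
      | none => pvOuterA ks' columns

def detect_category_column_py (columns : List (String × String)) : Option String × Option String :=
  match pvOuterA ["item_nome", "item", "frota", "modelo"] columns with
  | some (column_key, label) => (some column_key, some label)
  | none =>
      match columns with
      | (label, column_key) :: _ => (some column_key, some label)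
      | [] => (none, none)

-- ===== PORT B =====
-- hand port of 'preferred.index(s) if s in preferred else len(preferred)': exact (index of first occurrence, length if absent)
def pvRankB (ks : List String) (s : String) : Nat :=
  match ks with
  | [] => 0
  | k :: ks' => if k = s then 0 else pvRankB ks' s + 1

-- the single 'for label, column_key in columns' loop of Source B, state (best, best_rank)
def pvLoopB : List (String × String) → Option (String × String) → Nat → Option (String × String) × Nat
  | [], best, best_rank => (best, best_rank)
  | (label, column_key) :: rest, best, best_rank =>
      let rank := pvRankB ["item_nome", "item", "frota", "modelo"] column_key
      if rank < best_rank then pvLoopB rest (some (column_key, label)) rank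
      else pvLoopB rest best best_rank

def detect_category_column_py_alt (columns : List (String × String)) : Option String × Option String :=
  match (pvLoopB columns none 4).1 with
  | some (column_key, label) => (some column_key, some label)
  | none =>
      match columns with
      | (label, column_key) :: _ => (some column_key, some label)
      | [] => (none, none)

-- ===== PRECONDITION & SPEC =====
def Spec_detect_category_column_py (columns : List (String × String)) (out : Option String × Option String) : Prop := out = detect_category_column_py_alt columns
instance (columns : List (String × String)) (out : Option String × Option String) : Decidable (Spec_detect_category_column_py columns out) := by unfold Spec_detect_category_column_py; infer_instance

-- ===== CLAIM (what is proved, stated in full; the proofs are below) =====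
def Claim_equal_detect_category_column_py : Prop := ∀ (columns : List (String × String)), Dom_detect_category_column_py columns → Spec_detect_category_column_py columns (detect_category_column_py columns)

-- ===== LEMMAS AND PROOFS =====

def pvP : List String := ["item_nome", "item", "frota", "modelo"]

theorem pvOuterA_nil (ks : List String) : pvOuterA ks [] = none := by
  induction ks with
  | nil => rfl
  | cons k ks ih => simp [pvOuterA, pvFindA, ih]

theorem pvFindA_cons_ne {k ck : String} (l : String) (t : List (String × String))
    (h : ck ≠ k) : pvFindA k ((l, ck) :: t) = pvFindA k t := by
  simp [pvFindA, h]

theorem pvOuterA_cons_ne (kl : List String) {ck : String} (l : String) (t : List (String × String))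
    (h : ∀ k ∈ kl, ck ≠ k) : pvOuterA kl ((l, ck) :: t) = pvOuterA kl t := by
  induction kl with
  | nil => rfl
  | cons k kl ih =>
      have hk : ck ≠ k := h k (by simp)
      simp only [pvOuterA, pvFindA_cons_ne l t hk]
      cases pvFindA k t with
      | some r => rfl
      | none => exact ih (fun x hx => h x (by simp [hx]))

theorem pvOuterA_append_hit (kl1 kl2 : List String) {ck : String} (l : String)
    (t : List (String × String)) (h : ∀ k ∈ kl1, ck ≠ k) :
    pvOuterA (kl1 ++ ck :: kl2) ((l, ck) :: t) =
      match pvOuterA kl1 t with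
      | some p => some p
      | none => some (ck, l) := by
  induction kl1 with
  | nil => simp [pvOuterA, pvFindA]
  | cons k kl1 ih =>
      have hk : ck ≠ k := h k (by simp)
      simp only [List.cons_append, pvOuterA, pvFindA_cons_ne l t hk]
      cases pvFindA k t with
      | some r => rfl
      | none => exact ih (fun x hx => h x (by simp [hx]))

theorem pvRankB_lt_of_mem_take (ks : List String) (r : Nat) (k : String)
    (h : k ∈ ks.take r) : pvRankB ks k < r := by
  induction ks generalizing r with
  | nil => simp at h
  | cons k0 ks ih =>
      cases r with
      | zero => simp at h
      | succ r =>
          simp only [List.take_succ_cons, List.mem_cons] at h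
          by_cases hk : k0 = k
          · simp [pvRankB, hk]
          · rcases h with h | h
            · exact absurd h.symm hk
            · simp only [pvRankB, if_neg hk]
              exact Nat.succ_lt_succ (ih r h)

theorem pvRankB_absent {ck : String} (h0 : ck ≠ "item_nome") (h1 : ck ≠ "item")
    (h2 : ck ≠ "frota") (h3 : ck ≠ "modelo") : pvRankB pvP ck = 4 := by
  simp only [pvP, pvRankB, if_neg (Ne.symm h0), if_neg (Ne.symm h1), if_neg (Ne.symm h2),
    if_neg (Ne.symm h3)]

-- main loop invariant: B's single pass with state (b, r) computes A's chain over the first r preferred keys, defaulting to b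
theorem pvMain (cols : List (String × String)) :
    ∀ (b : Option (String × String)) (r : Nat), r ≤ 4 →
      (pvLoopB cols b r).1 =
        match pvOuterA (pvP.take r) cols with
        | some p => some p
        | none => b := by
  induction cols with
  | nil =>
      intro b r _
      simp [pvLoopB, pvOuterA_nil]
  | cons hd t ih =>
      intro b r hr
      obtain ⟨l, ck⟩ := hd
      show (pvLoopB ((l, ck) :: t) b r).1 = _
      simp only [pvLoopB,
        show (["item_nome", "item", "frota", "modelo"] : List String) = pvP from rfl]
      by_cases hlt : pvRankB pvP ck < r
      · rw [if_pos hlt]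
        rw [ih (some (ck, l)) (pvRankB pvP ck) (le_of_lt (lt_of_lt_of_le hlt hr))]
        -- ck must be one of the four preferred keys (otherwise its rank is 4, ≥ r)
        by_cases h0 : ck = "item_nome"
        · subst h0
          have hrk : pvRankB pvP "item_nome" = 0 := by decide
          rw [hrk] at hlt ⊢
          interval_cases r
          · rw [show List.take 1 pvP = [] ++ "item_nome" :: [] from rfl,
                pvOuterA_append_hit _ _ l t (by decide),
                show List.take 0 pvP = ([] : List String) from rfl]
            cases pvOuterA [] t <;> rfl
          · rw [show List.take 2 pvP = [] ++ "item_nome" :: ["item"] from rfl,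
                pvOuterA_append_hit _ _ l t (by decide),
                show List.take 0 pvP = ([] : List String) from rfl]
            cases pvOuterA [] t <;> rfl
          · rw [show List.take 3 pvP = [] ++ "item_nome" :: ["item", "frota"] from rfl,
                pvOuterA_append_hit _ _ l t (by decide),
                show List.take 0 pvP = ([] : List String) from rfl]
            cases pvOuterA [] t <;> rfl
          · rw [show List.take 4 pvP = [] ++ "item_nome" :: ["item", "frota", "modelo"] from rfl,
                pvOuterA_append_hit _ _ l t (by decide),
                show List.take 0 pvP = ([] : List String) from rfl]
            cases pvOuterA [] t <;> rfl
        · by_cases h1 : ck = "item"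
          · subst h1
            have hrk : pvRankB pvP "item" = 1 := by decide
            rw [hrk] at hlt ⊢
            interval_cases r
            · rw [show List.take 2 pvP = ["item_nome"] ++ "item" :: [] from rfl,
                  pvOuterA_append_hit _ _ l t (by decide),
                  show List.take 1 pvP = (["item_nome"] : List String) from rfl]
              cases pvOuterA ["item_nome"] t <;> rfl
            · rw [show List.take 3 pvP = ["item_nome"] ++ "item" :: ["frota"] from rfl,
                  pvOuterA_append_hit _ _ l t (by decide),
                  show List.take 1 pvP = (["item_nome"] : List String) from rfl]
              cases pvOuterA ["item_nome"] t <;> rfl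
            · rw [show List.take 4 pvP = ["item_nome"] ++ "item" :: ["frota", "modelo"] from rfl,
                  pvOuterA_append_hit _ _ l t (by decide),
                  show List.take 1 pvP = (["item_nome"] : List String) from rfl]
              cases pvOuterA ["item_nome"] t <;> rfl
          · by_cases h2 : ck = "frota"
            · subst h2
              have hrk : pvRankB pvP "frota" = 2 := by decide
              rw [hrk] at hlt ⊢
              interval_cases r
              · rw [show List.take 3 pvP = ["item_nome", "item"] ++ "frota" :: [] from rfl,
                    pvOuterA_append_hit _ _ l t (by decide),
                    show List.take 2 pvP = (["item_nome", "item"] : List String) from rfl]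
                cases pvOuterA ["item_nome", "item"] t <;> rfl
              · rw [show List.take 4 pvP = ["item_nome", "item"] ++ "frota" :: ["modelo"] from rfl,
                    pvOuterA_append_hit _ _ l t (by decide),
                    show List.take 2 pvP = (["item_nome", "item"] : List String) from rfl]
                cases pvOuterA ["item_nome", "item"] t <;> rfl
            · by_cases h3 : ck = "modelo"
              · subst h3
                have hrk : pvRankB pvP "modelo" = 3 := by decide
                rw [hrk] at hlt ⊢
                interval_cases r
                · rw [show List.take 4 pvP = ["item_nome", "item", "frota"] ++ "modelo" :: [] from rfl,
                      pvOuterA_append_hit _ _ l t (by decide),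
                      show List.take 3 pvP = (["item_nome", "item", "frota"] : List String) from rfl]
                  cases pvOuterA ["item_nome", "item", "frota"] t <;> rfl
              · exact absurd hlt (by rw [pvRankB_absent h0 h1 h2 h3]; omega)
      · rw [if_neg hlt]
        rw [ih b r hr]
        have hne : ∀ k ∈ pvP.take r, ck ≠ k := by
          intro k hk he
          subst he
          exact hlt (pvRankB_lt_of_mem_take pvP r ck hk)
        rw [pvOuterA_cons_ne _ l t hne]

-- ===== VERDICT (by name: the statement is the Claim_ definition above) =====
theorem detect_category_column_py_spec : Claim_equal_detect_category_column_py := by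
  intro columns _
  show detect_category_column_py columns = detect_category_column_py_alt columns
  unfold detect_category_column_py detect_category_column_py_alt
  rw [pvMain columns none 4 (le_refl 4)]
  have h4 : pvP.take 4 = pvP := rfl
  rw [h4]
  simp only [show (["item_nome", "item", "frota", "modelo"] : List String) = pvP from rfl]
  cases pvOuterA pvP columns with
  | some p => obtain ⟨ck, l⟩ := p; rfl
  | none => rfl
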